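-- pv_equiv track=rewrite | github.com/dsneddon00/RSA-Encryption | main.py | base26LetterToBase10
-- ===== SOURCE A (Python) =====
-- def base26LetterToBase10(statement):
--     statement = statement.lower()
--     if statement == " " or len(statement) == 0:
--         return 0
--     if len(statement) == 1:
--         return ord(statement) - 96
--     else:
--         return base26LetterToBase10(statement[1:]) + (26 ** (len(statement) - 1)) * (ord(statement[0]) - 96)
-- ===== SOURCE B (Python) =====
-- def base26LetterToBase10(statement):
--     s = statement.lower()
--     if not s:
--         return 0
--     total = 0 if s[-1] == " " else ord(s[-1]) - 96
--     p = 26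
--     for c in reversed(s[:-1]):
--         total += p * (ord(c) - 96)
--         p *= 26
--     return total
-- ===== Notes on version B (the rewrite author's own statement) =====
-- stated objective: alternative
-- what changed: Replaced the recursion that re-slices and re-lowers the string and recomputes 26**(len-1) from scratch at every level with a single right-to-left loop carrying a running power-of-26 accumulator.
import Mathlib
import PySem

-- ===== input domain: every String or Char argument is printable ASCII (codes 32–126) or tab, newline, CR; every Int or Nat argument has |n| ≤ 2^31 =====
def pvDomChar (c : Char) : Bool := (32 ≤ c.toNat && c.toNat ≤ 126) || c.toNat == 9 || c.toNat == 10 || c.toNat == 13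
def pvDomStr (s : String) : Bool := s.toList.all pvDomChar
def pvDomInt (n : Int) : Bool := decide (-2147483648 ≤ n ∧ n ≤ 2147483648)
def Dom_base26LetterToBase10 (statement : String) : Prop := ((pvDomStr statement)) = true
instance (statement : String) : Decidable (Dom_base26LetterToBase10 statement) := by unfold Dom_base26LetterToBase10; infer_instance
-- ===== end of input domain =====

-- B replaces A's recursion (re-slicing and re-lowering the string and recomputing 26**(len-1)
-- at every level) with one right-to-left loop carrying a running power-of-26 accumulator (objective: alternative).


-- ===== PORT A =====
-- A's recursion on the code points of the string; each call lowers its argument first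
-- ('statement = statement.lower()') and recurses on statement[1:] exactly as the Python does.
def base26Go (l : List Char) : Int :=
  if _h0 : PySem.Chars.lower l = [' '] ∨ (PySem.Chars.lower l).length = 0 then 0
  else if _h1 : (PySem.Chars.lower l).length = 1 then
    (((PySem.Chars.lower l).headD ' ').toNat : Int) - 96                    -- ord(statement) - 96
  else
    base26Go (PySem.List.slice (PySem.Chars.lower l) (some 1) none)         -- statement[1:]
      + 26 ^ ((PySem.Chars.lower l).length - 1) * ((((PySem.Chars.lower l).headD ' ').toNat : Int) - 96)
termination_by l.length
decreasing_by
  simp only [PySem.List.slice_from_one, List.length_tail, PySem.Chars.lower, List.length_map,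
    not_or] at *
  omega

def base26LetterToBase10 (statement : String) : Int := base26Go statement.toList

-- ===== PORT B =====
-- the loop 'for c in reversed(s[:-1]): total += p*(ord(c)-96); p *= 26' over state (total, p)
def base26AltLoop : List Char → Int × Int → Int × Int
  | [], st => st
  | c :: cs, (total, p) => base26AltLoop cs (total + p * ((c.toNat : Int) - 96), p * 26)

def base26LetterToBase10_alt (statement : String) : Int :=
  if (PySem.Chars.lower statement.toList).isEmpty then 0                    -- if not s: return 0
  else
    (base26AltLoop
      (PySem.List.slice (PySem.Chars.lower statement.toList) none (some (-1))).reverse  -- reversed(s[:-1])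
      ((if ((PySem.List.pyGet? (PySem.Chars.lower statement.toList) (-1)).getD ' ') = ' ' then 0
        else ((((PySem.List.pyGet? (PySem.Chars.lower statement.toList) (-1)).getD ' ').toNat : Int) - 96)),  -- s[-1] (s nonempty: exact)
       26)).1

-- ===== PRECONDITION & SPEC =====
def Spec_base26LetterToBase10 (statement : String) (out : Int) : Prop := out = base26LetterToBase10_alt statement
instance (statement : String) (out : Int) : Decidable (Spec_base26LetterToBase10 statement out) := by unfold Spec_base26LetterToBase10; infer_instance

-- ===== CLAIM (what is proved, stated in full; the proofs are below) =====
def Claim_equal_base26LetterToBase10 : Prop := ∀ (statement : String), Dom_base26LetterToBase10 statement → Spec_base26LetterToBase10 statement (base26LetterToBase10 statement)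

-- ===== LEMMAS AND PROOFS =====

-- per-character value ord(c) - 96
def b26v (c : Char) : Int := (c.toNat : Int) - 96

-- little-endian weighted sum: b26W [c0, c1, ...] = v c0 + 26 * v c1 + 26^2 * v c2 + ...
def b26W : List Char → Int
  | [] => 0
  | c :: cs => b26v c + 26 * b26W cs

-- the common characterisation of both programs on a (lowered) nonempty list
def b26R (m : List Char) : Int :=
  (if m.getLastD ' ' = ' ' then 0 else b26v (m.getLastD ' ')) + 26 * b26W m.dropLast.reverse

theorem lowerChar_idem (c : Char) :
    PySem.Chars.lowerChar (PySem.Chars.lowerChar c) = PySem.Chars.lowerChar c := by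
  simp only [PySem.Chars.lowerChar, PySem.Chars.isupper, Bool.and_eq_true, decide_eq_true_eq]
  split_ifs with h1 h2
  · exfalso
    have h65 : 65 ≤ c.toNat := UInt32.le_iff_toNat_le.mp (Char.le_def.mp h1.1)
    have hz : c.toNat ≤ 90 := UInt32.le_iff_toNat_le.mp (Char.le_def.mp h1.2)
    have hvalid : (c.toNat + 32).isValidChar := Or.inl (by omega)
    have ht : (Char.ofNat (c.toNat + 32)).toNat = c.toNat + 32 := by
      rw [Char.toNat_ofNat, if_pos hvalid]
    have hz2 : (Char.ofNat (c.toNat + 32)).toNat ≤ 90 :=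
      UInt32.le_iff_toNat_le.mp (Char.le_def.mp h2.2)
    omega
  · rfl
  · rfl

theorem lower_idem (l : List Char) :
    PySem.Chars.lower (PySem.Chars.lower l) = PySem.Chars.lower l := by
  simp [PySem.Chars.lower, List.map_map, Function.comp_def, lowerChar_idem]

theorem b26W_append (xs : List Char) (c : Char) :
    b26W (xs ++ [c]) = b26W xs + 26 ^ xs.length * b26v c := by
  induction xs with
  | nil => simp [b26W]
  | cons x xs ih => simp [b26W, ih, pow_succ]; ring

theorem b26AltLoop_fst (xs : List Char) (t p : Int) :
    (base26AltLoop xs (t, p)).1 = t + p * b26W xs := by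
  induction xs generalizing t p with
  | nil => simp [base26AltLoop, b26W]
  | cons c cs ih => simp [base26AltLoop, b26W, b26v, ih]; ring

theorem b26R_cons (c : Char) (rest : List Char) (h : rest ≠ []) :
    b26R (c :: rest) = b26R rest + 26 ^ rest.length * b26v c := by
  have hlast : (c :: rest).getLastD ' ' = rest.getLastD ' ' := by
    cases rest with
    | nil => exact absurd rfl h
    | cons r rs => simp [List.getLastD]
  have hdl : (c :: rest).dropLast = c :: rest.dropLast := by
    cases rest with
    | nil => exact absurd rfl h
    | cons r rs => simp
  have hlen : rest.dropLast.reverse.length = rest.length - 1 := by simp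
  have hpow : (26 : Int) * 26 ^ (rest.length - 1) = 26 ^ rest.length := by
    have hlen1 : rest.length - 1 + 1 = rest.length := by
      cases rest with
      | nil => exact absurd rfl h
      | cons r rs => simp
    calc (26 : Int) * 26 ^ (rest.length - 1) = 26 ^ (rest.length - 1 + 1) := by ring
      _ = 26 ^ rest.length := by rw [hlen1]
  rw [b26R, b26R, hlast, hdl]
  rw [List.reverse_cons, b26W_append, hlen]
  rw [mul_add, ← mul_assoc, hpow]
  ring

-- A's recursion computes b26R of the lowered string
theorem base26Go_eq (n : Nat) : ∀ (l : List Char), l.length ≤ n → l ≠ [] →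
    base26Go l = b26R (PySem.Chars.lower l) := by
  induction n with
  | zero =>
    intro l hl hne
    cases l with
    | nil => exact absurd rfl hne
    | cons c cs => simp at hl
  | succ n ih =>
    intro l hl hne
    rw [base26Go.eq_def]
    have hslen : (PySem.Chars.lower l).length = l.length := by
      simp [PySem.Chars.lower]
    have hs0 : (PySem.Chars.lower l).length ≠ 0 := by
      rw [hslen]
      simpa using hne
    by_cases h0 : PySem.Chars.lower l = [' '] ∨ (PySem.Chars.lower l).length = 0
    · have hsp : PySem.Chars.lower l = [' '] := by
        rcases h0 with h' | h'
        · exact h'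
        · exact absurd h' hs0
      rw [dif_pos h0, hsp]
      simp [b26R, b26W]
    · rw [dif_neg h0]
      by_cases h1 : (PySem.Chars.lower l).length = 1
      · rw [dif_pos h1]
        obtain ⟨c, hc⟩ := List.length_eq_one_iff.mp h1
        have hcne : c ≠ ' ' := fun hceq => h0 (Or.inl (by rw [hc, hceq]))
        rw [hc]
        simp [b26R, b26W, b26v, hcne]
      · rw [dif_neg h1]
        have hlne : PySem.Chars.lower l ≠ [] := by
          intro hc
          rw [hc] at hs0
          exact hs0 rfl
        obtain ⟨c, rest, hcr⟩ := List.exists_cons_of_ne_nil hlne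
        have hrlen : rest.length = l.length - 1 := by
          rw [hcr] at hslen
          simp at hslen
          omega
        have hrne : rest ≠ [] := by
          intro hr
          apply h1
          rw [hcr, hr]
          rfl
        have htail : PySem.List.slice (PySem.Chars.lower l) (some 1) none = rest := by
          rw [PySem.List.slice_from_one, hcr]
          rfl
        have hlow : PySem.Chars.lower rest = rest := by
          have hid := lower_idem l
          rw [hcr] at hid
          simp only [PySem.Chars.lower, List.map_cons, List.cons.injEq] at hid
          exact hid.2
        have ihr := ih rest (by omega) hrne
        rw [htail, ihr, hlow, hcr, b26R_cons c rest hrne]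
        simp [b26v]

-- B computes b26R of the lowered string too
theorem alt_eq (statement : String) (hne : PySem.Chars.lower statement.toList ≠ []) :
    base26LetterToBase10_alt statement = b26R (PySem.Chars.lower statement.toList) := by
  unfold base26LetterToBase10_alt
  obtain ⟨a, as, hcons⟩ := List.exists_cons_of_ne_nil hne
  rw [hcons]
  have hemp : (a :: as).isEmpty = false := rfl
  rw [hemp]
  simp only [Bool.false_eq_true, if_false]
  rw [PySem.List.pyGet?_neg_one, PySem.List.slice_to_neg_one]
  have hlast : (a :: as).getLast?.getD ' ' = (a :: as).getLastD ' ' :=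
    (List.getLastD_eq_getLast?).symm
  rw [hlast, b26AltLoop_fst]
  simp only [b26R, b26v]

-- ===== VERDICT (by name: the statement is the Claim_ definition above) =====
theorem base26LetterToBase10_spec : Claim_equal_base26LetterToBase10 := by
  intro statement _hdom
  unfold Spec_base26LetterToBase10
  by_cases h : statement.toList = []
  · unfold base26LetterToBase10 base26LetterToBase10_alt
    rw [base26Go.eq_def]
    simp [h, PySem.Chars.lower]
  · have hne : PySem.Chars.lower statement.toList ≠ [] := by
      intro hc
      exact h (List.map_eq_nil_iff.mp hc)
    rw [alt_eq statement hne]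
    exact base26Go_eq statement.toList.length statement.toList le_rfl h
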